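-- pv_equiv track=rewrite | github.com/2030-Y/MAS | assignment3/plot1.py | mask_none
-- ===== SOURCE A (Python) =====
-- def mask_none(x_list, y_list):
--     xx, yy = [], []
--     for x, y in zip(x_list, y_list):
--         if x is None or y is None:
--             continue
--         xx.append(x)
--         yy.append(y)
--     return xx, yy
-- ===== SOURCE B (Python) =====
-- def mask_none(x_list, y_list):
--     n = min(len(x_list), len(y_list))
--     idx = [i for i in range(n)
--            if x_list[i] is not None and y_list[i] is not None]
--     return [x_list[i] for i in idx], [y_list[i] for i in idx]
-- ===== Notes on version B (the rewrite author's own statement) =====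
-- stated objective: alternative
-- what changed: B never zips or accumulates pairs: it first computes the list of surviving indices over range(min(len,len)), then builds each output independently by indexing back into the original lists (staged index-selection passes instead of A's single zip loop appending into two accumulators).
import Mathlib
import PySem

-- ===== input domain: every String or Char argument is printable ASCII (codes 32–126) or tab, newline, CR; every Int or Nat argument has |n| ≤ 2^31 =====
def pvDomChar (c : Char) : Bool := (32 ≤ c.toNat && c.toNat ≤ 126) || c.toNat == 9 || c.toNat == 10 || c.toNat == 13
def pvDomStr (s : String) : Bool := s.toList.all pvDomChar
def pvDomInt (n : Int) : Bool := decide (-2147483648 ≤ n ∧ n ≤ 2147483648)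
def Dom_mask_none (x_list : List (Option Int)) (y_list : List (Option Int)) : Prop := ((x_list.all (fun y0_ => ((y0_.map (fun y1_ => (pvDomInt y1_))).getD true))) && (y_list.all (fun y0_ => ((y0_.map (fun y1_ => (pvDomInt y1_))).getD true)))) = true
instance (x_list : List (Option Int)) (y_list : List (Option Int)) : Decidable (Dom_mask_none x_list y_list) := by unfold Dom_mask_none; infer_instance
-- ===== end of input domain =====

-- B replaces A's single zip loop (appending into two accumulators) by staged passes:
-- compute the surviving indices once, then build each output by indexing back into
-- the originals; objective: alternative decomposition, same cost.

-- ===== PORT A =====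
def mask_none (x_list : List (Option Int)) (y_list : List (Option Int)) : List Int × List Int :=
  (x_list.zip y_list).foldl
    (fun acc xy =>
      match xy with
      | (none, _) => acc
      | (_, none) => acc
      | (some x, some y) => (acc.1 ++ [x], acc.2 ++ [y]))
    ([], [])

-- ===== PORT B =====
-- x_list[i] for 0 ≤ i < len is exact as getD i none; the filter guarantees the
-- element is `some`, so the final `.getD 0` default is never used.
def mask_none_alt (x_list : List (Option Int)) (y_list : List (Option Int)) : List Int × List Int :=
  let n := min x_list.length y_list.length
  let idx := (List.range n).filter
    (fun i => (x_list.getD i none).isSome && (y_list.getD i none).isSome)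
  (idx.map (fun i => (x_list.getD i none).getD 0),
   idx.map (fun i => (y_list.getD i none).getD 0))

-- ===== PRECONDITION & SPEC =====
def Spec_mask_none (x_list : List (Option Int)) (y_list : List (Option Int)) (out : List Int × List Int) : Prop := out = mask_none_alt x_list y_list
instance (x_list : List (Option Int)) (y_list : List (Option Int)) (out : List Int × List Int) : Decidable (Spec_mask_none x_list y_list out) := by unfold Spec_mask_none; infer_instance

-- ===== CLAIM (what is proved, stated in full; the proofs are below) =====
def Claim_equal_mask_none : Prop := ∀ (x_list : List (Option Int)) (y_list : List (Option Int)), Dom_mask_none x_list y_list → Spec_mask_none x_list y_list (mask_none x_list y_list)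

-- ===== LEMMAS AND PROOFS =====

def pvStepA (acc : List Int × List Int) (xy : Option Int × Option Int) : List Int × List Int :=
  match xy with
  | (none, _) => acc
  | (_, none) => acc
  | (some x, some y) => (acc.1 ++ [x], acc.2 ++ [y])

def pvKeep (xy : Option Int × Option Int) : Option (Int × Int) :=
  match xy with
  | (some x, some y) => some (x, y)
  | _ => none

lemma foldA_eq (l : List (Option Int × Option Int)) (xx yy : List Int) :
    l.foldl pvStepA (xx, yy) =
      (xx ++ (l.filterMap pvKeep).map Prod.fst, yy ++ (l.filterMap pvKeep).map Prod.snd) := by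
  induction l generalizing xx yy with
  | nil => simp
  | cons hd tl ih =>
    rcases hd with ⟨x, y⟩
    rcases x with _ | x <;> rcases y with _ | y <;>
      simp [pvStepA, pvKeep, List.foldl_cons, ih]

lemma alt_eq (x_list y_list : List (Option Int)) :
    mask_none_alt x_list y_list =
      (((x_list.zip y_list).filterMap pvKeep).map Prod.fst,
       ((x_list.zip y_list).filterMap pvKeep).map Prod.snd) := by
  induction x_list generalizing y_list with
  | nil => simp [mask_none_alt]
  | cons x xs ih =>
    cases y_list with
    | nil => simp [mask_none_alt]
    | cons y ys =>
      have h := ih ys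
      simp only [mask_none_alt] at h ⊢
      simp only [List.length_cons, Nat.succ_min_succ, List.range_succ_eq_map,
        List.filter_cons, List.filter_map, List.getD_cons_zero,
        List.getD_cons_succ, Function.comp_def, List.zip_cons_cons,
        List.filterMap_cons, Prod.mk.injEq] at h ⊢
      rcases x with _ | x <;> rcases y with _ | y <;>
        simp_all [pvKeep, Function.comp_def, List.getD]

-- ===== VERDICT (by name: the statement is the Claim_ definition above) =====
theorem mask_none_spec : Claim_equal_mask_none := by
  intro x_list y_list _
  unfold Spec_mask_none mask_none
  have h : (fun acc xy => match xy with
      | (none, _) => acc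
      | (_, none) => acc
      | (some x, some y) => (acc.1 ++ [x], acc.2 ++ [y])) = pvStepA := by
    funext acc xy
    rcases xy with ⟨x, y⟩
    rcases x with _ | x <;> rcases y with _ | y <;> rfl
  rw [h, foldA_eq, alt_eq]
  simp
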